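-- pv_equiv track=rewrite | github.com/Jennamj31/SecurePassAnalyzer | wordlist_generator.py | generate_wordlist
-- ===== SOURCE A (Python) =====
-- def leetspeak_variants(word):
--     leet_map = {'a': '4', 'e': '3', 'l': '1', 'o': '0', 's': '5'}
--     variants = [word]
--     for i in range(len(word)):
--         if word[i].lower() in leet_map:
--             for var in list(variants):
--                 variants.append(var[:i] + leet_map[word[i].lower()] + var[i+1:])
--     return set(variants)
--
-- def generate_wordlist(inputs, years=(2000, 2025)):
--     base_words = set()
--     for word in inputs:
--         base_words.update(leetspeak_variants(word))
--
--     combos = set()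
--     for word in base_words:
--         combos.add(word)
--         for year in range(*years):
--             combos.add(f"{word}{year}")
--             combos.add(f"{year}{word}")
--
--     return sorted(combos)
-- ===== SOURCE B (Python) =====
-- def _variants(word):
--     # all leetspeak variants of word: per-position choice sets, cartesian product
--     if not word:
--         return ['']
--     ch = word[0]
--     leet = {'a': '4', 'e': '3', 'l': '1', 'o': '0', 's': '5'}.get(ch.lower())
--     opts = [ch] if leet is None else [ch, leet]
--     rest = _variants(word[1:])
--     return [o + r for o in opts for r in rest]
--
-- def generate_wordlist(inputs, years=(2000, 2025)):
--     base = {v for w in inputs for v in _variants(w)}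
--     ys = [str(y) for y in range(*years)]
--     combos = base | {w + y for w in base for y in ys} | {y + w for w in base for y in ys}
--     return sorted(combos)
-- ===== Notes on version B (the rewrite author's own statement) =====
-- stated objective: alternative
-- what changed: leetspeak variants are produced by a recursive cartesian product over per-character choice sets instead of A's snapshot-and-append doubling loop with slice surgery, and the combo set is built from set comprehensions/unions instead of nested add-loops.
import Mathlib
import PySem

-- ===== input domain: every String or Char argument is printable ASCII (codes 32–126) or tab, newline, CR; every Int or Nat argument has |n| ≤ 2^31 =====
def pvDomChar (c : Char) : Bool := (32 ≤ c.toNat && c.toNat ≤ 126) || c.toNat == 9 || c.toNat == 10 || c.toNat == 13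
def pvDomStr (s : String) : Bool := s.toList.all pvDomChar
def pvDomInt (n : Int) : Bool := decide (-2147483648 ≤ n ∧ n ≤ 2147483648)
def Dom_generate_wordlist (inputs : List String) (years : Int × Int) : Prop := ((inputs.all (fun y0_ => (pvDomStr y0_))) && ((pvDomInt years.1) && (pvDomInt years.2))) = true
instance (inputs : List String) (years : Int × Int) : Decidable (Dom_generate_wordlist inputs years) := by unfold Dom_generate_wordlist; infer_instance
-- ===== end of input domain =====

-- B replaces A's snapshot-and-append doubling loop over positions by a recursive cartesian
-- product over per-character choice sets, and builds the combo set by set comprehensions/unions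
-- instead of nested add-loops (objective: alternative; same result, proved below).
-- Strings are handled as code-point lists via PySem.Chars (exact on the ASCII domain);
-- the leet dict's one-character string keys/values are modelled as Chars.

-- ===== PORT A =====
def pvLeetMap : PySem.Dict Char Char :=
  PySem.Dict.ofList [('a', '4'), ('e', '3'), ('l', '1'), ('o', '0'), ('s', '5')]

-- the body of A's `for i in range(len(word))` loop (variants is the growing list)
def pvStepA (word : List Char) (variants : List (List Char)) (i : Nat) : List (List Char) :=
  let c := PySem.List.pyGetD word (i : Int) ' '   -- word[i]; 0 ≤ i < len(word), never raises
  if pvLeetMap.contains (PySem.Chars.lowerChar c) then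
    variants ++ variants.map (fun var =>
      PySem.List.slice var none (some (i : Int)) ++
        [pvLeetMap.getD (PySem.Chars.lowerChar c) ' '] ++
        PySem.List.slice var (some ((i : Int) + 1)) none)
  else variants

def leetspeak_variants (word : List Char) : PySem.Set (List Char) :=
  PySem.Set.ofList ((List.range word.length).foldl (pvStepA word) [word])

def generate_wordlist (inputs : List String) (years : Int × Int) : List String :=
  let base_words : PySem.Set (List Char) :=
    inputs.foldl (fun s w => PySem.Set.update s (leetspeak_variants w.toList)) PySem.Set.empty
  let combos : PySem.Set (List Char) :=
    base_words.foldl (fun cs word =>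
      (PySem.List.pyRange years.1 years.2 1).foldl (fun cs y =>
        PySem.Set.add (PySem.Set.add cs (word ++ PySem.Int.toChars y)) (PySem.Int.toChars y ++ word))
        (PySem.Set.add cs word)) PySem.Set.empty
  (PySem.List.sorted combos (fun x => x) false).map String.ofList

-- ===== PORT B =====
-- per-character choice set: [ch] or [ch, leet digit]
def pvOpts (ch : Char) : List Char :=
  match pvLeetMap.get? (PySem.Chars.lowerChar ch) with
  | none => [ch]
  | some d => [ch, d]

def pvVariantsAlt : List Char → List (List Char)
  | [] => [[]]
  | ch :: rest =>
    (pvOpts ch).flatMap (fun o => (pvVariantsAlt rest).map (fun r => o :: r))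

def generate_wordlist_alt (inputs : List String) (years : Int × Int) : List String :=
  let base : PySem.Set (List Char) :=
    PySem.Set.ofList (inputs.flatMap (fun w => pvVariantsAlt w.toList))
  let ys : List (List Char) := (PySem.List.pyRange years.1 years.2 1).map PySem.Int.toChars
  let combos : PySem.Set (List Char) :=
    PySem.Set.union
      (PySem.Set.union base
        (PySem.Set.ofList (base.flatMap (fun w => ys.map (fun y => w ++ y)))))
      (PySem.Set.ofList (base.flatMap (fun w => ys.map (fun y => y ++ w))))
  (PySem.List.sorted combos (fun x => x) false).map String.ofList

-- ===== PRECONDITION & SPEC =====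
def Spec_generate_wordlist (inputs : List String) (years : Int × Int) (out : List String) : Prop := out = generate_wordlist_alt inputs years
instance (inputs : List String) (years : Int × Int) (out : List String) : Decidable (Spec_generate_wordlist inputs years out) := by unfold Spec_generate_wordlist; infer_instance

-- ===== CLAIM (what is proved, stated in full; the proofs are below) =====
def Claim_equal_generate_wordlist : Prop := ∀ (inputs : List String) (years : Int × Int), Dom_generate_wordlist inputs years → Spec_generate_wordlist inputs years (generate_wordlist inputs years)

-- ===== LEMMAS AND PROOFS =====

theorem sorted_eq_of_perm_listChar (xs ys : List (List Char)) (h : xs.Perm ys) :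
    PySem.List.sorted xs (fun x => x) false = PySem.List.sorted ys (fun x => x) false := by
  convert PySem.List.sorted_eq_sorted_of_perm xs ys (fun a => a) (fun a b hh => hh) h using 2

-- every variant has the word's length
theorem pvVariantsAlt_length {w v : List Char} (h : v ∈ pvVariantsAlt w) : v.length = w.length := by
  induction w generalizing v with
  | nil => simp [pvVariantsAlt] at h; simp [h]
  | cons c cs ih =>
    simp only [pvVariantsAlt, List.mem_flatMap, List.mem_map] at h
    obtain ⟨o, _, r, hr, rfl⟩ := h
    simp [ih hr]

-- snoc characterisation of the product
theorem pvVariantsAlt_snoc {xs : List Char} {c : Char} {v : List Char} :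
    v ∈ pvVariantsAlt (xs ++ [c]) ↔
      ∃ u ∈ pvVariantsAlt xs, ∃ o ∈ pvOpts c, v = u ++ [o] := by
  induction xs generalizing v with
  | nil =>
    simp [pvVariantsAlt]
  | cons a as ih =>
    simp only [List.cons_append, pvVariantsAlt, List.mem_flatMap, List.mem_map]
    constructor
    · rintro ⟨o, ho, r, hr, rfl⟩
      obtain ⟨u, hu, o', ho', rfl⟩ := ih.mp hr
      exact ⟨o :: u, ⟨o, ho, u, hu, rfl⟩, o', ho', rfl⟩
    · rintro ⟨u, ⟨o, ho, u', hu', rfl⟩, o', ho', rfl⟩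
      exact ⟨o, ho, u' ++ [o'], ih.mpr ⟨u', hu', o', ho', rfl⟩, rfl⟩

-- A's loop after the first k positions = prefix products glued to the untouched suffix
theorem pvLoopA_mem (word : List Char) : ∀ (k : Nat), k ≤ word.length → ∀ (v : List Char),
    (v ∈ (List.range k).foldl (pvStepA word) [word] ↔
      ∃ u ∈ pvVariantsAlt (word.take k), v = u ++ word.drop k) := by
  intro k
  induction k with
  | zero => intro _ v; simp [pvVariantsAlt]
  | succ k ih =>
    intro hk v
    have hklt : k < word.length := hk
    have hih := ih (Nat.le_of_succ_le hk)
    rw [List.range_succ, List.foldl_append, List.foldl_cons, List.foldl_nil]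
    have hget : PySem.List.pyGetD word ((k : Nat) : Int) ' ' = word[k] := by
      rw [PySem.List.pyGetD_natCast]; exact List.getD_eq_getElem _ _ hklt
    have hdropk : word.drop k = word[k] :: word.drop (k+1) := List.drop_eq_getElem_cons hklt
    have htake : word.take (k+1) = word.take k ++ [word[k]] := by
      rw [List.take_add_one]; simp [List.getElem?_eq_getElem hklt]
    have hrepl : ∀ u : List Char, u.length = k → ∀ d : Char,
        PySem.List.slice (u ++ word.drop k) none (some (k : Int)) ++ [d] ++
          PySem.List.slice (u ++ word.drop k) (some ((k : Int) + 1)) none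
        = (u ++ [d]) ++ word.drop (k+1) := by
      intro u hu d
      have h1 : PySem.List.slice (u ++ word.drop k) none (some ((k:Nat) : Int)) = u := by
        rw [PySem.List.slice_to_natCast, List.take_left' hu]
      have hcast : ((k:Nat) : Int) + 1 = (((k + 1 : Nat)) : Int) := by push_cast; ring
      have h2 : PySem.List.slice (u ++ word.drop k) (some ((k : Int) + 1)) none = word.drop (k+1) := by
        rw [hcast, PySem.List.slice_from_natCast, hdropk]
        have h3 : u ++ word[k] :: word.drop (k+1) = (u ++ [word[k]]) ++ word.drop (k+1) := by simp
        rw [h3, List.drop_left' (by simp [hu])]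
      rw [h1, h2]
    have hulen : ∀ u ∈ pvVariantsAlt (word.take k), u.length = k := fun u hu => by
      rw [pvVariantsAlt_length hu, List.length_take]; omega
    simp only [pvStepA, hget]
    by_cases hcon : pvLeetMap.contains (PySem.Chars.lowerChar word[k]) = true
    · rw [if_pos hcon]
      rw [PySem.Dict.contains_eq_isSome_get?] at hcon
      obtain ⟨d, hd⟩ := Option.isSome_iff_exists.mp hcon
      have hgetD : pvLeetMap.getD (PySem.Chars.lowerChar word[k]) ' ' = d := by
        simp [PySem.Dict.getD, hd]
      have hopts : pvOpts word[k] = [word[k], d] := by simp [pvOpts, hd]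
      rw [htake]
      simp only [List.mem_append, List.mem_map, hgetD]
      constructor
      · rintro (h | ⟨v', hv', rfl⟩)
        · obtain ⟨u, hu, rfl⟩ := (hih v).mp h
          refine ⟨u ++ [word[k]], pvVariantsAlt_snoc.mpr ⟨u, hu, word[k], by simp [hopts], rfl⟩, ?_⟩
          rw [hdropk]; simp
        · obtain ⟨u, hu, rfl⟩ := (hih v').mp hv'
          exact ⟨u ++ [d], pvVariantsAlt_snoc.mpr ⟨u, hu, d, by simp [hopts], rfl⟩,
            hrepl u (hulen u hu) d⟩
      · rintro ⟨u', hu', rfl⟩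
        obtain ⟨u, hu, o, ho, rfl⟩ := pvVariantsAlt_snoc.mp hu'
        rw [hopts] at ho
        rcases List.mem_pair.mp ho with rfl | rfl
        · exact Or.inl ((hih _).mpr ⟨u, hu, by rw [hdropk]; simp⟩)
        · exact Or.inr ⟨u ++ word.drop k, (hih _).mpr ⟨u, hu, rfl⟩, hrepl u (hulen u hu) o⟩
    · rw [if_neg hcon]
      have hnone : pvLeetMap.get? (PySem.Chars.lowerChar word[k]) = none := by
        rw [PySem.Dict.contains_eq_isSome_get?] at hcon
        simpa using hcon
      have hopts : pvOpts word[k] = [word[k]] := by simp [pvOpts, hnone]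
      rw [htake, hih]
      constructor
      · rintro ⟨u, hu, rfl⟩
        exact ⟨u ++ [word[k]], pvVariantsAlt_snoc.mpr ⟨u, hu, word[k], by simp [hopts], rfl⟩,
          by rw [hdropk]; simp⟩
      · rintro ⟨u', hu', rfl⟩
        obtain ⟨u, hu, o, ho, rfl⟩ := pvVariantsAlt_snoc.mp hu'
        rw [hopts, List.mem_singleton] at ho; subst ho
        exact ⟨u, hu, by rw [hdropk]; simp⟩

theorem pvVariantsA_mem {word v : List Char} :
    v ∈ leetspeak_variants word ↔ v ∈ pvVariantsAlt word := by
  have h := pvLoopA_mem word word.length le_rfl v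
  simp only [leetspeak_variants, PySem.Set.mem_ofList]
  rw [h]; simp

-- membership through A's base_words fold
theorem pvBaseA_mem (inputs : List String) (s : PySem.Set (List Char)) (x : List Char) :
    x ∈ inputs.foldl (fun s w => PySem.Set.update s (leetspeak_variants w.toList)) s ↔
      x ∈ s ∨ ∃ w ∈ inputs, x ∈ leetspeak_variants w.toList := by
  induction inputs generalizing s with
  | nil => simp
  | cons a l ih => simp [ih, PySem.Set.mem_update, or_assoc]

-- membership through A's combos folds
theorem pvInnerA_mem (yrs : List Int) (w : List Char) (s : PySem.Set (List Char)) (x : List Char) :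
    x ∈ yrs.foldl (fun cs y =>
        PySem.Set.add (PySem.Set.add cs (w ++ PySem.Int.toChars y)) (PySem.Int.toChars y ++ w)) s ↔
      x ∈ s ∨ ∃ y ∈ yrs, x = w ++ PySem.Int.toChars y ∨ x = PySem.Int.toChars y ++ w := by
  induction yrs generalizing s with
  | nil => simp
  | cons a l ih => simp [ih, PySem.Set.mem_add, or_assoc]

theorem pvInnerA_nodup (yrs : List Int) (w : List Char) (s : PySem.Set (List Char)) (h : s.Nodup) :
    (yrs.foldl (fun cs y =>
        PySem.Set.add (PySem.Set.add cs (w ++ PySem.Int.toChars y)) (PySem.Int.toChars y ++ w)) s).Nodup := by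
  induction yrs generalizing s with
  | nil => exact h
  | cons a l ih => exact ih _ (PySem.Set.nodup_add _ _ (PySem.Set.nodup_add _ _ h))

theorem pvCombosA_mem (base : List (List Char)) (yrs : List Int) (s : PySem.Set (List Char)) (x : List Char) :
    x ∈ base.foldl (fun cs w =>
        yrs.foldl (fun cs y =>
          PySem.Set.add (PySem.Set.add cs (w ++ PySem.Int.toChars y)) (PySem.Int.toChars y ++ w))
          (PySem.Set.add cs w)) s ↔
      x ∈ s ∨ ∃ w ∈ base, x = w ∨ ∃ y ∈ yrs, x = w ++ PySem.Int.toChars y ∨ x = PySem.Int.toChars y ++ w := by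
  induction base generalizing s with
  | nil => simp
  | cons a l ih => rw [List.foldl_cons, ih, pvInnerA_mem]; simp [PySem.Set.mem_add, or_assoc]

theorem pvCombosA_nodup (base : List (List Char)) (yrs : List Int) (s : PySem.Set (List Char)) (h : s.Nodup) :
    (base.foldl (fun cs w =>
        yrs.foldl (fun cs y =>
          PySem.Set.add (PySem.Set.add cs (w ++ PySem.Int.toChars y)) (PySem.Int.toChars y ++ w))
          (PySem.Set.add cs w)) s).Nodup := by
  induction base generalizing s with
  | nil => exact h
  | cons a l ih => exact ih _ (pvInnerA_nodup _ _ _ (PySem.Set.nodup_add _ _ h))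

-- ===== VERDICT (by name: the statement is the Claim_ definition above) =====
theorem generate_wordlist_spec : Claim_equal_generate_wordlist := by
  intro inputs years _
  unfold Spec_generate_wordlist generate_wordlist generate_wordlist_alt
  simp only []
  set yrs := PySem.List.pyRange years.1 years.2 1 with hyrs
  set baseA : PySem.Set (List Char) :=
    inputs.foldl (fun s w => PySem.Set.update s (leetspeak_variants w.toList)) PySem.Set.empty with hbaseA
  set baseB : PySem.Set (List Char) :=
    PySem.Set.ofList (inputs.flatMap (fun w => pvVariantsAlt w.toList)) with hbaseB
  have hbase : ∀ x, x ∈ baseA ↔ x ∈ baseB := by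
    intro x
    rw [hbaseA, hbaseB, pvBaseA_mem]
    simp [PySem.Set.mem_ofList, List.mem_flatMap, pvVariantsA_mem, PySem.Set.empty]
  have hndA : (baseA.foldl (fun cs w =>
      yrs.foldl (fun cs y =>
        PySem.Set.add (PySem.Set.add cs (w ++ PySem.Int.toChars y)) (PySem.Int.toChars y ++ w))
        (PySem.Set.add cs w)) PySem.Set.empty).Nodup :=
    pvCombosA_nodup _ _ _ List.nodup_nil
  have hndB : (PySem.Set.union
      (PySem.Set.union baseB
        (PySem.Set.ofList (baseB.flatMap (fun w => (yrs.map PySem.Int.toChars).map (fun y => w ++ y)))))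
      (PySem.Set.ofList (baseB.flatMap (fun w => (yrs.map PySem.Int.toChars).map (fun y => y ++ w))))).Nodup :=
    PySem.Set.nodup_union _ _ (PySem.Set.nodup_union _ _ (PySem.Set.nodup_ofList _))
  congr 1
  apply sorted_eq_of_perm_listChar
  rw [List.perm_ext_iff_of_nodup hndA hndB]
  intro x
  rw [pvCombosA_mem]
  simp only [PySem.Set.mem_union, PySem.Set.mem_ofList, List.mem_flatMap, List.mem_map,
    PySem.Set.empty, List.not_mem_nil, false_or]
  constructor
  · rintro ⟨w, hw, rfl | ⟨y, hy, rfl | rfl⟩⟩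
    · exact Or.inl (Or.inl ((hbase x).mp hw))
    · exact Or.inl (Or.inr ⟨w, (hbase w).mp hw, _, ⟨y, hy, rfl⟩, rfl⟩)
    · exact Or.inr ⟨w, (hbase w).mp hw, _, ⟨y, hy, rfl⟩, rfl⟩
  · rintro ((hx | ⟨w, hw, ty, ⟨y, hy, rfl⟩, rfl⟩) | ⟨w, hw, ty, ⟨y, hy, rfl⟩, rfl⟩)
    · exact ⟨x, (hbase x).mpr hx, Or.inl rfl⟩
    · exact ⟨w, (hbase w).mpr hw, Or.inr ⟨y, hy, Or.inl rfl⟩⟩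
    · exact ⟨w, (hbase w).mpr hw, Or.inr ⟨y, hy, Or.inr rfl⟩⟩
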